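-- pv_equiv track=rewrite | github.com/y2sec/Algorithm | Programmers/77.py | solution
-- ===== SOURCE A (Python) =====
-- def solution(a):
--     answer = 2
--
--     left = [0 for _ in range(len(a))]
--     right = [0 for _ in range(len(a))]
--
--     left[0] = a[0]
--     right[-1] = a[-1]
--
--     for i in range(1, len(a)):
--         left[i] = a[i] if left[i-1] > a[i] else left[i-1]
--
--     for i in range(len(a)-2, -1, -1):
--         right[i] = a[i] if right[i+1] > a[i] else right[i+1]
--
--     for i in range(1, len(a)-1):
--         if left[i-1] < a[i] and a[i] > right[i+1]:
--             continue
--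
--         answer += 1
--
--     return answer
-- ===== SOURCE B (Python) =====
-- def solution(a):
--     answer = 2
--     for i in range(1, len(a) - 1):
--         if not (a[i] > min(a[:i]) and a[i] > min(a[i + 1:])):
--             answer += 1
--     return answer
-- ===== Notes on version B (the rewrite author's own statement) =====
-- stated objective: simpler
-- what changed: Drops A's two precomputed prefix/suffix-minimum arrays entirely and instead recomputes min(a[:i]) and min(a[i+1:]) directly inside one counting loop.
import Mathlib
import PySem

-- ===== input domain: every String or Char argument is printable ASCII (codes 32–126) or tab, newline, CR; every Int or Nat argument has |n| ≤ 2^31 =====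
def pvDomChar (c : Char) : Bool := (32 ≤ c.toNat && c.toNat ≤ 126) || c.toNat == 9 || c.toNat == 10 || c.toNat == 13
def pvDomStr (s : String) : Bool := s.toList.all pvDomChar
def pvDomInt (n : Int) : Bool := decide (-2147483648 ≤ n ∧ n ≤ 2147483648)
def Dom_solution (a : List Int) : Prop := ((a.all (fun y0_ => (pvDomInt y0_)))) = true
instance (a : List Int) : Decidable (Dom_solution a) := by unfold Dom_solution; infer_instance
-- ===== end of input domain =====

-- B drops A's precomputed prefix/suffix-minimum arrays and recomputes min(a[:i]) / min(a[i+1:]) by rescanning inside one counting loop (simpler, not faster).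

-- ===== PORT A =====
def solution (a : List Int) : Int :=
  let n : Int := PySem.List.len a
  -- left = [0]*n ; right = [0]*n
  let left0 : List Int := (PySem.List.pyRange 0 n 1).map (fun _ => 0)
  let right0 : List Int := (PySem.List.pyRange 0 n 1).map (fun _ => 0)
  -- left[0] = a[0]; right[-1] = a[-1]   (IndexError on empty a: excluded by Pre_; pyGetD/pySetD are exact in range)
  let left1 := PySem.List.pySetD left0 0 (PySem.List.pyGetD a 0 0)
  let right1 := PySem.List.pySetD right0 (-1) (PySem.List.pyGetD a (-1) 0)
  let left := (PySem.List.pyRange 1 n 1).foldl (fun l i =>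
      PySem.List.pySetD l i (if PySem.List.pyGetD l (i-1) 0 > PySem.List.pyGetD a i 0
        then PySem.List.pyGetD a i 0 else PySem.List.pyGetD l (i-1) 0)) left1
  let right := (PySem.List.pyRange (n-2) (-1) (-1)).foldl (fun r i =>
      PySem.List.pySetD r i (if PySem.List.pyGetD r (i+1) 0 > PySem.List.pyGetD a i 0
        then PySem.List.pyGetD a i 0 else PySem.List.pyGetD r (i+1) 0)) right1
  (PySem.List.pyRange 1 (n-1) 1).foldl (fun answer i =>
      if PySem.List.pyGetD left (i-1) 0 < PySem.List.pyGetD a i 0 ∧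
         PySem.List.pyGetD a i 0 > PySem.List.pyGetD right (i+1) 0
      then answer else answer + 1) 2

-- ===== PORT B =====
def solution_alt (a : List Int) : Int :=
  -- min(a[:i]) / min(a[i+1:]): both slices are nonempty for i in range(1, len(a)-1),
  -- so min? is always `some`; the `.getD 0` default is never taken.
  (PySem.List.pyRange 1 (PySem.List.len a - 1) 1).foldl (fun answer i =>
    if ¬ (PySem.List.pyGetD a i 0 > (PySem.List.min? (PySem.List.slice a none (some i)) (fun x => x)).getD 0 ∧
          PySem.List.pyGetD a i 0 > (PySem.List.min? (PySem.List.slice a (some (i+1)) none) (fun x => x)).getD 0)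
    then answer + 1 else answer) 2

-- ===== PRECONDITION & SPEC =====
-- Pre_ excludes only the empty list, on which A raises IndexError (it reads a[0]); B returns 2 there.
def Pre_solution (a : List Int) : Prop := a ≠ []
instance (a : List Int) : Decidable (Pre_solution a) := by unfold Pre_solution; infer_instance
def pvWitness_solution : List Int := [5, 1, 4]

def Spec_solution (a : List Int) (out : Int) : Prop := out = solution_alt a
instance (a : List Int) (out : Int) : Decidable (Spec_solution a out) := by unfold Spec_solution; infer_instance

-- ===== CLAIM (what is proved, stated in full; the proofs are below) =====
def Claim_equal_solution : Prop := ∀ (a : List Int), Dom_solution a → Pre_solution a → Spec_solution a (solution a)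

-- ===== LEMMAS AND PROOFS =====

-- prefix minimum: pmin a j = min(a[0..j])
def pmin (a : List Int) : Nat → Int
  | 0 => a.getD 0 0
  | j+1 => min (pmin a j) (a.getD (j+1) 0)

-- suffix minimum: smin a j = min(a[j..len-1])  (for j < len)
def smin (a : List Int) (j : Nat) : Int :=
  if j + 1 < a.length then min (smin a (j+1)) (a.getD j 0) else a.getD j 0
termination_by a.length - j

lemma foldl_min_comm (t : List Int) : ∀ x y : Int, t.foldl min (min x y) = min x (t.foldl min y) := by
  induction t with
  | nil => intro x y; simp
  | cons z t ih =>
      intro x y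
      simp only [List.foldl_cons]
      rw [min_assoc, ih]

lemma getD_set_ne (xs : List Int) (k j : Nat) (v : Int) (h : j ≠ k) :
    (xs.set k v).getD j 0 = xs.getD j 0 := by
  simp [List.getD_eq_getElem?_getD, List.getElem?_set_ne (Ne.symm h)]

lemma getD_set_self (xs : List Int) (k : Nat) (v : Int) (h : k < xs.length) :
    (xs.set k v).getD k 0 = v := by
  simp [List.getD_eq_getElem?_getD, h]

lemma if_gt_eq_min (p x : Int) : (if p > x then x else p) = min p x := by
  rw [min_def]; split_ifs <;> omega

lemma take_foldl_pmin (h : Int) (t : List Int) : ∀ j : Nat, j ≤ t.length →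
    (t.take j).foldl min h = pmin (h :: t) j := by
  intro j
  induction j with
  | zero => intro _; simp [pmin]
  | succ j ih =>
      intro hj
      have hjl : j < t.length := by omega
      rw [List.take_succ_eq_append_getElem hjl, List.foldl_append, ih (by omega)]
      simp only [List.foldl_cons, List.foldl_nil, pmin]
      have : (h :: t).getD (j+1) 0 = t[j] := by
        simpa using List.getD_eq_getElem t 0 hjl
      rw [this]

lemma min?_take (a : List Int) : ∀ k : Nat, 1 ≤ k → k ≤ a.length →
    PySem.List.min? (a.take k) (fun y => y) = some (pmin a (k-1)) := by
  intro k hk1 hk2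
  match a, k with
  | [], _ => simp at hk2; omega
  | _ :: _, 0 => omega
  | h :: t, k+1 =>
      rw [List.take_succ_cons, PySem.List.min?_id_cons,
          take_foldl_pmin h t k (by simpa using hk2)]
      simp

lemma min?_drop (a : List Int) : ∀ j : Nat, j < a.length →
    PySem.List.min? (a.drop j) (fun y => y) = some (smin a j) := by
  intro j hj
  induction hfuel : a.length - j generalizing j with
  | zero => omega
  | succ d ih =>
      rw [List.drop_eq_getElem_cons hj, PySem.List.min?_id_cons]
      by_cases hj1 : j + 1 < a.length
      · have hrec := ih (j+1) hj1 (by omega)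
        rw [List.drop_eq_getElem_cons hj1, PySem.List.min?_id_cons] at hrec
        have hfold : (a.drop (j+2)).foldl min a[j+1] = smin a (j+1) := by
          simpa using hrec
        rw [List.drop_eq_getElem_cons hj1]
        simp only [List.foldl_cons]
        rw [foldl_min_comm, hfold]
        have hs : smin a j = min (smin a (j+1)) a[j] := by
          rw [smin, if_pos hj1, List.getD_eq_getElem a 0 hj]
        rw [hs, min_comm]
      · have : a.drop (j+1) = [] := by
          apply List.drop_eq_nil_of_le; omega
        rw [this]
        simp only [List.foldl_nil]
        rw [smin, if_neg hj1, List.getD_eq_getElem a 0 hj]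


lemma pySetD_neg_one (xs : List Int) (v : Int) (h : 1 ≤ xs.length) :
    PySem.List.pySetD xs (-1) v = xs.set (xs.length - 1) v := by
  simp [PySem.List.pySetD, PySem.List.pySet?, PySem.List.pyIdx?]
  rw [if_pos h]
  rfl

lemma leftLoop (a : List Int) (init : List Int)
    (hlen : init.length = a.length) (h0 : init.getD 0 0 = pmin a 0) :
    ∀ k : Nat, 1 ≤ k → k ≤ a.length →
    (((PySem.List.pyRange 1 (k:Int) 1).foldl
        (fun l i => PySem.List.pySetD l i (if PySem.List.pyGetD l (i-1) 0 > PySem.List.pyGetD a i 0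
          then PySem.List.pyGetD a i 0 else PySem.List.pyGetD l (i-1) 0)) init).length = a.length ∧
     ∀ j : Nat, j < k →
       ((PySem.List.pyRange 1 (k:Int) 1).foldl
        (fun l i => PySem.List.pySetD l i (if PySem.List.pyGetD l (i-1) 0 > PySem.List.pyGetD a i 0
          then PySem.List.pyGetD a i 0 else PySem.List.pyGetD l (i-1) 0)) init).getD j 0 = pmin a j) := by
  intro k
  induction k with
  | zero => omega
  | succ k ih =>
    intro _ hk2
    by_cases hk1 : 1 ≤ k
    · have hcast : ((k+1 : Nat) : Int) = (k:Int) + 1 := by omega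
      have hsplit : PySem.List.pyRange 1 ((k+1 : Nat) : Int) 1
          = PySem.List.pyRange 1 (k:Int) 1 ++ [(k:Int)] := by
        rw [hcast]; exact PySem.List.pyRange_one_succ_right (by exact_mod_cast hk1)
      obtain ⟨ihlen, ihval⟩ := ih hk1 (by omega)
      rw [hsplit, List.foldl_append]
      simp only [List.foldl_cons, List.foldl_nil]
      have e1 : ((k:Int)) - 1 = ((k-1 : Nat) : Int) := by omega
      rw [e1]
      simp only [PySem.List.pyGetD_natCast, PySem.List.pySetD_natCast]
      rw [ihval (k-1) (by omega)]
      have hv : (if pmin a (k-1) > a.getD k 0 then a.getD k 0 else pmin a (k-1))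
          = pmin a k := by
        rw [if_gt_eq_min]
        have : k = (k-1) + 1 := by omega
        rw [this, pmin]
        have : k - 1 + 1 = k := by omega
        rw [this]
      rw [hv]
      refine ⟨by simpa using ihlen, ?_⟩
      intro j hj
      by_cases hjk : j = k
      · subst hjk
        rw [getD_set_self _ _ _ (by omega)]
      · rw [getD_set_ne _ _ _ _ hjk]
        exact ihval j (by omega)
    · have hk0 : k = 0 := by omega
      subst hk0
      rw [PySem.List.pyRange_one_eq_nil (by norm_num)]
      simp only [List.foldl_nil]
      refine ⟨hlen, ?_⟩
      intro j hj
      have : j = 0 := by omega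
      rw [this, h0]

lemma rightLoop (a : List Int) : ∀ (j : Nat) (r : List Int), r.length = a.length →
    j + 2 ≤ a.length →
    (∀ m : Nat, j < m → m < a.length → r.getD m 0 = smin a m) →
    (((PySem.List.pyRange (j:Int) (-1) (-1)).foldl
        (fun r i => PySem.List.pySetD r i (if PySem.List.pyGetD r (i+1) 0 > PySem.List.pyGetD a i 0
          then PySem.List.pyGetD a i 0 else PySem.List.pyGetD r (i+1) 0)) r).length = a.length ∧
     ∀ m : Nat, m < a.length →
       ((PySem.List.pyRange (j:Int) (-1) (-1)).foldl
        (fun r i => PySem.List.pySetD r i (if PySem.List.pyGetD r (i+1) 0 > PySem.List.pyGetD a i 0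
          then PySem.List.pyGetD a i 0 else PySem.List.pyGetD r (i+1) 0)) r).getD m 0 = smin a m) := by
  intro j
  induction j with
  | zero =>
    intro r hlen hn hinv
    rw [PySem.List.pyRange_neg_one_cons (by omega),
        PySem.List.pyRange_neg_one_eq_nil (by omega)]
    simp only [List.foldl_cons, List.foldl_nil]
    have e1 : ((0:Nat) : Int) + 1 = ((0+1 : Nat) : Int) := by omega
    rw [e1]
    simp only [PySem.List.pyGetD_natCast, PySem.List.pySetD_natCast]
    rw [hinv (0+1) (by omega) (by omega)]
    have hg0 : a.getD (0:Nat) 0 = a.getD 0 0 := rfl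
    have hv : (if smin a (0+1) > a.getD (0:Nat) 0 then a.getD (0:Nat) 0 else smin a (0+1))
        = smin a 0 := by
      rw [if_gt_eq_min]
      conv_rhs => rw [smin]
      rw [if_pos (show 0+1 < a.length by omega)]
    rw [hv]
    refine ⟨by simpa using hlen, ?_⟩
    intro m hm
    by_cases hm0 : m = 0
    · subst hm0; rw [getD_set_self _ _ _ (by omega)]
    · rw [getD_set_ne _ _ _ _ hm0]
      exact hinv m (by omega) hm
  | succ j ih =>
    intro r hlen hn hinv
    rw [PySem.List.pyRange_neg_one_cons (by omega)]
    have e0 : ((j+1 : Nat) : Int) - 1 = (j : Int) := by omega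
    rw [e0]
    simp only [List.foldl_cons]
    have e1 : ((j+1 : Nat) : Int) + 1 = ((j+1+1 : Nat) : Int) := by omega
    rw [e1]
    simp only [PySem.List.pyGetD_natCast, PySem.List.pySetD_natCast]
    rw [hinv (j+1+1) (by omega) (by omega)]
    have hv : (if smin a (j+1+1) > a.getD (j+1) 0 then a.getD (j+1) 0 else smin a (j+1+1))
        = smin a (j+1) := by
      rw [if_gt_eq_min]
      conv_rhs => rw [smin]
      rw [if_pos (show j+1+1 < a.length by omega)]
    rw [hv]
    apply ih
    · simpa using hlen
    · omega
    · intro m hm1 hm2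
      by_cases hmj : m = j + 1
      · subst hmj; rw [getD_set_self _ _ _ (by omega)]
      · rw [getD_set_ne _ _ _ _ hmj]
        exact hinv m (by omega) hm2

-- ===== VERDICT =====
theorem solution_spec : Claim_equal_solution := by
  intro a hdom hpre
  unfold Spec_solution solution solution_alt
  simp only [PySem.List.len_eq]
  have hn : 1 ≤ a.length := List.length_pos_of_ne_nil hpre
  by_cases hsmall : ((a.length : Int)) - 1 ≤ 1
  · rw [PySem.List.pyRange_one_eq_nil hsmall]
    rfl
  · apply PySem.List.foldl_congr_mem
    intro acc i hi
    rw [PySem.List.mem_pyRange_one] at hi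
    obtain ⟨hi1, hi2⟩ := hi
    have hik : i = ((i.toNat : Nat) : Int) := by omega
    rw [hik]
    generalize hkk : i.toNat = k at *
    have hk1 : 1 ≤ k := by omega
    have hk2 : k + 1 < a.length := by omega
    have e1 : ((k : Nat) : Int) - 1 = ((k-1 : Nat) : Int) := by omega
    have e2 : ((k : Nat) : Int) + 1 = ((k+1 : Nat) : Int) := by omega
    rw [e1, e2]
    simp only [PySem.List.pyGetD_natCast]
    have hl0 : (List.map (fun x => (0:Int)) (PySem.List.pyRange 0 (a.length : Int) 1)).length
        = a.length := by
      rw [List.length_map, PySem.List.length_pyRange_one]; omega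
    have init1len : (PySem.List.pySetD (List.map (fun x => (0:Int))
        (PySem.List.pyRange 0 (a.length : Int) 1)) 0 (PySem.List.pyGetD a 0 0)).length
        = a.length := by
      rw [PySem.List.length_pySetD]; exact hl0
    have h0 : (PySem.List.pySetD (List.map (fun x => (0:Int))
        (PySem.List.pyRange 0 (a.length : Int) 1)) 0 (PySem.List.pyGetD a 0 0)).getD 0 0
        = pmin a 0 := by
      rw [PySem.List.pySetD_of_nonneg _ _ (show (0:Int) ≤ 0 by norm_num)]
      simp only [Int.toNat_zero]
      rw [getD_set_self _ _ _ (by rw [hl0]; exact hn)]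
      rw [PySem.List.pyGetD_zero]
      rfl
    have hL := (leftLoop a _ init1len h0 a.length hn le_rfl).2 (k-1) (by omega)
    rw [hL]
    have init2eq : PySem.List.pySetD (List.map (fun x => (0:Int))
        (PySem.List.pyRange 0 (a.length : Int) 1)) (-1) (PySem.List.pyGetD a (-1) 0)
        = (List.map (fun x => (0:Int)) (PySem.List.pyRange 0 (a.length : Int) 1)).set
            (a.length - 1) (PySem.List.pyGetD a (-1) 0) := by
      rw [pySetD_neg_one _ _ (by rw [hl0]; exact hn), hl0]
    have init2len : (PySem.List.pySetD (List.map (fun x => (0:Int))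
        (PySem.List.pyRange 0 (a.length : Int) 1)) (-1) (PySem.List.pyGetD a (-1) 0)).length
        = a.length := by
      rw [init2eq, List.length_set]; exact hl0
    have hinv2 : ∀ m : Nat, a.length - 2 < m → m < a.length →
        (PySem.List.pySetD (List.map (fun x => (0:Int))
          (PySem.List.pyRange 0 (a.length : Int) 1)) (-1) (PySem.List.pyGetD a (-1) 0)).getD m 0
        = smin a m := by
      intro m hm1 hm2
      have hm : m = a.length - 1 := by omega
      subst hm
      rw [init2eq, getD_set_self _ _ _ (by rw [hl0]; omega)]
      rw [PySem.List.pyGetD_neg_one a 0 hpre]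
      rw [smin, if_neg (by omega)]
      rw [List.getLast_eq_getElem, List.getD_eq_getElem a 0 (by omega)]
    have e3 : ((a.length : Int)) - 2 = ((a.length - 2 : Nat) : Int) := by omega
    rw [e3]
    have hR := (rightLoop a (a.length - 2) _ init2len (by omega) hinv2).2 (k+1) (by omega)
    rw [hR]
    rw [PySem.List.slice_to_natCast, PySem.List.slice_from_natCast]
    rw [min?_take a k hk1 (by omega), min?_drop a (k+1) (by omega)]
    simp only [Option.getD_some]
    split_ifs <;> omega
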